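-- pv_equiv track=rewrite | github.com/lovearthai/poregpt_workflows | vqe_workflow/step04_evaluate_tokenizer/01_extract_motif_signal.py | find_all_occurrences_atgcn
-- ===== SOURCE A (Python) =====
-- VALID_SEQ_BASES = {"A", "T", "G", "C"}
--
-- def normalize_base_char(ch: str) -> str:
--     """
--     Normalize base char:
--       - uppercase
--       - U -> T
--       - others kept as uppercase
--     """
--     ch = ch.upper()
--     if ch == "U":
--         return "T"
--     return ch
--
-- def normalize_seq_atgcn(seq: str) -> str:
--     return "".join(normalize_base_char(c) for c in seq)
--
-- def match_atgcn(seq_sub: str, pattern: str) -> bool: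
--     """
--     Pattern supports:
--       A/T/G/C exact match
--       N matches any A/T/G/C
--
--     Sequence side must be A/T/G/C only.
--     """
--     if len(seq_sub) != len(pattern):
--         return False
--
--     for s, p in zip(seq_sub, pattern):
--         s = normalize_base_char(s)
--         p = normalize_base_char(p)
--
--         if s not in VALID_SEQ_BASES:
--             return False
--
--         if p == "N":
--             continue
--
--         if p not in VALID_SEQ_BASES:
--             return False
--
--         if s != p:
--             return False
--
--     return True
--
-- def find_all_occurrences_atgcn(seq: str, pattern: str):
--     """
--     Overlapping matches are allowed.
--     """
--     seq = normalize_seq_atgcn(seq)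
--     pattern = normalize_seq_atgcn(pattern)
--
--     starts = []
--     L = len(pattern)
--     if L == 0 or len(seq) < L:
--         return starts
--
--     for i in range(len(seq) - L + 1):
--         if match_atgcn(seq[i:i + L], pattern):
--             starts.append(i)
--     return starts
-- ===== SOURCE B (Python) =====
-- def find_all_occurrences_atgcn(seq, pattern):
--     """Column-wise candidate pruning: normalize once, then filter the start
--     positions by one pattern column at a time (no per-window slicing)."""
--     bases = "ATGC"
--
--     def norm(c):
--         c = c.upper()
--         return "T" if c == "U" else c
--
--     s = [norm(c) for c in seq]
--     p = [norm(c) for c in pattern]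
--     if not p:
--         return []
--     candidates = list(range(len(s) - len(p) + 1))
--     for j, pc in enumerate(p):
--         if pc == "N":
--             candidates = [i for i in candidates if s[i + j] in bases]
--         elif pc in bases:
--             candidates = [i for i in candidates if s[i + j] == pc]
--         else:
--             return []
--     return candidates
-- ===== Notes on version B (the rewrite author's own statement) =====
-- stated objective: alternative
-- what changed: Replaces A's per-window slicing and re-normalization with column-wise pruning of a candidate start-position list over once-normalized arrays (one filter per pattern position).
import Mathlib
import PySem

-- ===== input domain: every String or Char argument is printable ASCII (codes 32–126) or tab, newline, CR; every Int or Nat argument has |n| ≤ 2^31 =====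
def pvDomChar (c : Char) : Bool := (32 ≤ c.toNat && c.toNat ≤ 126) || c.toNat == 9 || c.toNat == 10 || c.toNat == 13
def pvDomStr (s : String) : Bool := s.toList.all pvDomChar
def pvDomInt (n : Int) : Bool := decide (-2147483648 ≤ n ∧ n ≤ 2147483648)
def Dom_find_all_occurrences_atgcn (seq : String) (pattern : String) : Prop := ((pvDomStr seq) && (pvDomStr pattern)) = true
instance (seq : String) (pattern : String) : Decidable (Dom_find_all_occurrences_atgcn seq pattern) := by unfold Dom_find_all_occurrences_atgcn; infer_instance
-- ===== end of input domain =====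

-- B replaces A's per-window slicing/rescanning with column-wise pruning of the candidate
-- start positions over once-normalized character lists (objective: alternative).

-- ===== PORT A =====

-- normalize_base_char
def pvNormChar (c : Char) : Char :=
  let u := PySem.Chars.upperChar c
  if u = 'U' then 'T' else u

-- normalize_seq_atgcn (on the char-list side)
def pvNormSeq (cs : List Char) : List Char := cs.map pvNormChar

-- the for-loop of match_atgcn over zip(seq_sub, pattern)
def pvMatchGo : List (Char × Char) → Bool
  | [] => true
  | (s0, p0) :: rest =>
    let s := pvNormChar s0
    let p := pvNormChar p0
    if ¬ (s = 'A' ∨ s = 'T' ∨ s = 'G' ∨ s = 'C') then false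
    else if p = 'N' then pvMatchGo rest
    else if ¬ (p = 'A' ∨ p = 'T' ∨ p = 'G' ∨ p = 'C') then false
    else if s ≠ p then false
    else pvMatchGo rest

-- match_atgcn
def pvMatch (seq_sub : List Char) (pattern : List Char) : Bool :=
  if seq_sub.length ≠ pattern.length then false
  else pvMatchGo (seq_sub.zip pattern)

def find_all_occurrences_atgcn (seq : String) (pattern : String) : List Int :=
  let s := pvNormSeq seq.toList
  let p := pvNormSeq pattern.toList
  let starts : List Int := []
  let L : Int := p.length
  if L = 0 ∨ (s.length : Int) < L then starts
  else
    (PySem.List.pyRange 0 ((s.length : Int) - L + 1) 1).foldl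
      (fun acc i =>
        if pvMatch (PySem.List.slice s (some i) (some (i + L))) p then acc ++ [i] else acc)
      starts

-- ===== PORT B =====

-- Source B's nested `norm`
def pvNormB (c : Char) : Char :=
  let u := PySem.Chars.upperChar c
  if u = 'U' then 'T' else u

def pvIsBase (c : Char) : Bool := c == 'A' || c == 'T' || c == 'G' || c == 'C'

-- the pruning loop over enumerate(p); `return []` on an invalid pattern char
def pvPrune (s : List Char) : List (Int × Char) → List Int → List Int
  | [], cands => cands
  | (j, pc) :: rest, cands =>
    if pc = 'N' then
      pvPrune s rest (cands.filter (fun i => pvIsBase (PySem.List.pyGetD s (i + j) ' ')))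
    else if pvIsBase pc then
      pvPrune s rest (cands.filter (fun i => PySem.List.pyGetD s (i + j) ' ' == pc))
    else []

def find_all_occurrences_atgcn_alt (seq : String) (pattern : String) : List Int :=
  let s := seq.toList.map pvNormB
  let p := pattern.toList.map pvNormB
  if p.length = 0 then []
  else
    pvPrune s (PySem.List.enumerate p 0)
      (PySem.List.pyRange 0 ((s.length : Int) - (p.length : Int) + 1) 1)

-- ===== PRECONDITION & SPEC =====
def Spec_find_all_occurrences_atgcn (seq : String) (pattern : String) (out : List Int) : Prop := out = find_all_occurrences_atgcn_alt seq pattern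
instance (seq : String) (pattern : String) (out : List Int) : Decidable (Spec_find_all_occurrences_atgcn seq pattern out) := by unfold Spec_find_all_occurrences_atgcn; infer_instance

-- ===== CLAIM (what is proved, stated in full; the proofs are below) =====
def Claim_equal_find_all_occurrences_atgcn : Prop := ∀ (seq : String) (pattern : String), Dom_find_all_occurrences_atgcn seq pattern → Spec_find_all_occurrences_atgcn seq pattern (find_all_occurrences_atgcn seq pattern)

-- ===== LEMMAS AND PROOFS =====

-- pattern char is usable: 'N' wildcard or a concrete base
def pvValidPC (pc : Char) : Bool := pc == 'N' || pvIsBase pc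

-- the column test B applies at offset j for pattern char pc
def pvCond (s : List Char) (i j : Int) (pc : Char) : Bool :=
  if pc = 'N' then pvIsBase (PySem.List.pyGetD s (i + j) ' ') else PySem.List.pyGetD s (i + j) ' ' == pc

theorem pv_all_and {α : Type} (l : List α) (p q : α → Bool) :
    (l.all fun x => p x && q x) = (l.all p && l.all q) := by
  induction l with
  | nil => rfl
  | cons x t ih =>
    simp only [List.all_cons, ih]
    cases p x <;> cases q x <;> cases t.all p <;> cases t.all q <;> rfl

theorem pvNorm_idem_small :
    ∀ n : Nat, n < 127 → pvNormChar (pvNormChar (Char.ofNat n)) = pvNormChar (Char.ofNat n) := by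
  decide

theorem pvNorm_idem (c : Char) (h : pvDomChar c = true) :
    pvNormChar (pvNormChar c) = pvNormChar c := by
  have h2 : c.toNat < 127 := by
    unfold pvDomChar at h; simp at h; omega
  have := pvNorm_idem_small c.toNat h2
  rwa [Char.ofNat_toNat] at this

-- B's pruning loop is one filter by the conjunction of all column tests (or [] on a bad pattern char)
theorem pvPrune_spec (s : List Char) :
    ∀ (jps : List (Int × Char)) (cands : List Int),
      pvPrune s jps cands =
        if jps.all (fun jp => pvValidPC jp.2) then
          cands.filter (fun i => jps.all (fun jp => pvCond s i jp.1 jp.2))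
        else [] := by
  intro jps
  induction jps with
  | nil => intro cands; simp [pvPrune]
  | cons hd tl ih =>
    intro cands
    obtain ⟨j, pc⟩ := hd
    by_cases hN : pc = 'N'
    · subst hN
      rw [show pvPrune s ((j, 'N') :: tl) cands
            = pvPrune s tl (cands.filter fun i => pvIsBase (PySem.List.pyGetD s (i + j) ' ')) from rfl,
          ih]
      simp only [List.all_cons]
      have hv : pvValidPC ('N' : Char) = true := by decide
      rw [hv, Bool.true_and]
      split
      · rw [List.filter_filter]
        refine List.filter_congr ?_
        intro i _
        simp [pvCond, Bool.and_comm]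
      · rfl
    · by_cases hB : pvIsBase pc = true
      · rw [show pvPrune s ((j, pc) :: tl) cands
              = if pc = 'N' then
                  pvPrune s tl (cands.filter fun i => pvIsBase (PySem.List.pyGetD s (i + j) ' '))
                else if pvIsBase pc then
                  pvPrune s tl (cands.filter fun i => PySem.List.pyGetD s (i + j) ' ' == pc)
                else [] from rfl,
            if_neg hN, if_pos hB, ih]
        simp only [List.all_cons]
        have hv : pvValidPC pc = true := by simp [pvValidPC, hB]
        rw [hv, Bool.true_and]
        split
        · rw [List.filter_filter]
          refine List.filter_congr ?_
          intro i _
          simp [pvCond, hN, Bool.and_comm]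
        · rfl
      · rw [show pvPrune s ((j, pc) :: tl) cands
              = if pc = 'N' then
                  pvPrune s tl (cands.filter fun i => pvIsBase (PySem.List.pyGetD s (i + j) ' '))
                else if pvIsBase pc then
                  pvPrune s tl (cands.filter fun i => PySem.List.pyGetD s (i + j) ' ' == pc)
                else [] from rfl,
            if_neg hN, if_neg hB]
        have hv : pvValidPC pc = false := by simp [pvValidPC, hN, hB]
        simp [hv]

-- A's inner loop, on pairs whose chars are already normalized, is `all` of a per-pair test
theorem pvMatchGo_all :
    ∀ l : List (Char × Char),
      (∀ sp ∈ l, pvNormChar sp.1 = sp.1 ∧ pvNormChar sp.2 = sp.2) →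
      pvMatchGo l
        = l.all (fun sp => pvValidPC sp.2 && (if sp.2 = 'N' then pvIsBase sp.1 else sp.1 == sp.2)) := by
  intro l
  induction l with
  | nil => intro _; rfl
  | cons hd tl ih =>
    intro h
    obtain ⟨s0, p0⟩ := hd
    have hs0 : pvNormChar s0 = s0 := (h (s0, p0) (List.mem_cons_self)).1
    have hp0 : pvNormChar p0 = p0 := (h (s0, p0) (List.mem_cons_self)).2
    have htl := ih (fun sp hsp => h sp (List.mem_cons_of_mem _ hsp))
    simp only [pvMatchGo, hs0, hp0, List.all_cons]
    by_cases hsB : s0 = 'A' ∨ s0 = 'T' ∨ s0 = 'G' ∨ s0 = 'C'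
    · have hsB' : pvIsBase s0 = true := by
        simp only [pvIsBase]
        rcases hsB with h1 | h1 | h1 | h1 <;> subst h1 <;> decide
      rw [if_neg (not_not_intro hsB)]
      by_cases hN : p0 = 'N'
      · subst hN
        simp [htl, pvValidPC, hsB']
      · rw [if_neg hN]
        by_cases hpB : p0 = 'A' ∨ p0 = 'T' ∨ p0 = 'G' ∨ p0 = 'C'
        · have hpB' : pvIsBase p0 = true := by
            simp only [pvIsBase]
            rcases hpB with h1 | h1 | h1 | h1 <;> subst h1 <;> decide
          rw [if_neg (not_not_intro hpB)]
          by_cases heq : s0 = p0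
          · subst heq
            simp [htl, pvValidPC, hpB', hN]
          · simp [heq, pvValidPC, hpB', hN]
        · have hpB' : pvIsBase p0 = false := by
            simp only [pvIsBase]
            simp only [not_or] at hpB
            obtain ⟨h1, h2, h3, h4⟩ := hpB
            simp [beq_eq_false_iff_ne, h1, h2, h3, h4]
          rw [if_pos hpB]
          simp [pvValidPC, hpB', hN]
    · have hsB' : pvIsBase s0 = false := by
        simp only [pvIsBase]
        simp only [not_or] at hsB
        obtain ⟨h1, h2, h3, h4⟩ := hsB
        simp [beq_eq_false_iff_ne, h1, h2, h3, h4]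
      rw [if_pos hsB]
      by_cases hN : p0 = 'N'
      · simp [hN, hsB']
      · simp [hN, pvValidPC]
        intro _ h1
        cases h1
        simp_all [pvIsBase]

-- the window A slices, zipped with the pattern, is the pattern's enumerate read through pyGetD
theorem pvZip_window (s p : List Char) (i : Int) (hi : 0 ≤ i)
    (hiL : i.toNat + p.length ≤ s.length) :
    (PySem.List.slice s (some i) (some (i + p.length))).zip p
      = (PySem.List.enumerate p 0).map (fun jp => (PySem.List.pyGetD s (i + jp.1) ' ', jp.2)) := by
  have hslice : PySem.List.slice s (some i) (some (i + p.length))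
      = (s.drop i.toNat).take p.length := by
    rw [PySem.List.slice_toNat _ hi (by omega)]
    congr 1
    omega
  have hlen : ((s.drop i.toNat).take p.length).length = p.length := by
    simp
    omega
  rw [hslice]
  apply List.ext_getElem
  · simp [hlen, PySem.List.length_enumerate]
  · intro k hk1 hk2
    simp only [List.length_zip, hlen, min_self] at hk1
    rw [List.getElem_zip, List.getElem_map, PySem.List.getElem_enumerate]
    have hk3 : i.toNat + k < s.length := by omega
    have h1 : ((s.drop i.toNat).take p.length)[k] = s[i.toNat + k] := by
      rw [List.getElem_take, List.getElem_drop]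
    have h2 : PySem.List.pyGetD s (i + (0 + k)) ' ' = s[i.toNat + k] := by
      have hidx : i + (0 + k) = ((i.toNat + k : Nat) : Int) := by omega
      rw [hidx, PySem.List.pyGetD_natCast]
      exact List.getD_eq_getElem s ' ' hk3
    rw [h1, h2]

-- A's window test, pointwise
theorem pvMatch_window (s p : List Char) (i : Int) (hi : 0 ≤ i)
    (hiL : i.toNat + p.length ≤ s.length)
    (hs : ∀ c ∈ s, pvNormChar c = c) (hp : ∀ c ∈ p, pvNormChar c = c) :
    pvMatch (PySem.List.slice s (some i) (some (i + p.length))) p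
      = (p.all pvValidPC
          && (PySem.List.enumerate p 0).all (fun jp => pvCond s i jp.1 jp.2)) := by
  have hz := pvZip_window s p i hi hiL
  have hlen : (PySem.List.slice s (some i) (some (i + p.length))).length = p.length := by
    have : (PySem.List.slice s (some i) (some (i + p.length))).zip p
        = (PySem.List.enumerate p 0).map (fun jp => (PySem.List.pyGetD s (i + jp.1) ' ', jp.2)) := hz
    rw [PySem.List.slice_toNat _ hi (by omega)]
    simp
    omega
  have hmem : ∀ sp ∈ (PySem.List.slice s (some i) (some (i + p.length))).zip p,
      pvNormChar sp.1 = sp.1 ∧ pvNormChar sp.2 = sp.2 := by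
    intro sp hsp
    have h1 := List.of_mem_zip hsp
    exact ⟨hs _ (PySem.List.mem_of_mem_slice _ _ _ h1.1), hp _ h1.2⟩
  rw [pvMatch, if_neg (by simp [hlen]), pvMatchGo_all _ hmem, hz, List.all_map]
  have hstep : ((fun sp : Char × Char =>
        pvValidPC sp.2 && (if sp.2 = 'N' then pvIsBase sp.1 else sp.1 == sp.2))
      ∘ (fun jp : Int × Char => (PySem.List.pyGetD s (i + jp.1) ' ', jp.2)))
      = fun jp : Int × Char => pvValidPC jp.2 && pvCond s i jp.1 jp.2 := by
    funext jp
    simp [Function.comp, pvCond]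
  rw [hstep, pv_all_and]
  congr 1
  have h1 : ((PySem.List.enumerate p 0).map (fun x => x.2)).all pvValidPC
      = ((PySem.List.enumerate p 0).all fun jp => pvValidPC jp.2) := List.all_map ..
  rw [PySem.List.map_snd_enumerate] at h1
  exact h1.symm

-- ===== VERDICT (by name: the statement is the Claim_ definition above) =====
theorem find_all_occurrences_atgcn_spec : Claim_equal_find_all_occurrences_atgcn := by
  intro seq pattern hDom
  unfold Spec_find_all_occurrences_atgcn
  unfold Dom_find_all_occurrences_atgcn at hDom
  simp only [Bool.and_eq_true, pvDomStr] at hDom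
  have hBA : pvNormB = pvNormChar := rfl
  unfold find_all_occurrences_atgcn find_all_occurrences_atgcn_alt pvNormSeq
  rw [hBA]
  set s := seq.toList.map pvNormChar with hsdef
  set p := pattern.toList.map pvNormChar with hpdef
  have hs : ∀ c ∈ s, pvNormChar c = c := by
    intro c hc
    rw [hsdef] at hc
    obtain ⟨c0, hc0, rfl⟩ := List.mem_map.mp hc
    exact pvNorm_idem c0 (by
      have := List.all_eq_true.mp hDom.1 c0 hc0
      simpa using this)
  have hp : ∀ c ∈ p, pvNormChar c = c := by
    intro c hc
    rw [hpdef] at hc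
    obtain ⟨c0, hc0, rfl⟩ := List.mem_map.mp hc
    exact pvNorm_idem c0 (by
      have := List.all_eq_true.mp hDom.2 c0 hc0
      simpa using this)
  by_cases hL0 : p.length = 0
  · simp [hL0]
  · rw [if_neg hL0]
    by_cases hnL : s.length < p.length
    · rw [if_pos (Or.inr (by exact_mod_cast hnL))]
      have hR : PySem.List.pyRange 0 ((s.length : Int) - (p.length : Int) + 1) 1 = [] :=
        PySem.List.pyRange_one_eq_nil (by omega)
      rw [hR, pvPrune_spec]
      split <;> rfl
    · rw [if_neg (not_or.mpr ⟨by exact_mod_cast hL0, by exact_mod_cast hnL⟩)]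
      rw [PySem.List.foldl_append_if_eq_filter, List.nil_append, pvPrune_spec]
      have hcong : ∀ i ∈ PySem.List.pyRange 0 ((s.length : Int) - (p.length : Int) + 1) 1,
          pvMatch (PySem.List.slice s (some i) (some (i + (p.length : Int)))) p
            = (p.all pvValidPC
                && (PySem.List.enumerate p 0).all (fun jp => pvCond s i jp.1 jp.2)) := by
        intro i hi
        rw [PySem.List.mem_pyRange_one] at hi
        exact pvMatch_window s p i hi.1 (by omega) hs hp
      rw [List.filter_congr hcong]
      have hvv : ((PySem.List.enumerate p 0).all fun jp => pvValidPC jp.2) = p.all pvValidPC := by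
        have h1 : ((PySem.List.enumerate p 0).map (fun x => x.2)).all pvValidPC
            = ((PySem.List.enumerate p 0).all fun jp => pvValidPC jp.2) := List.all_map ..
        rw [PySem.List.map_snd_enumerate] at h1
        exact h1.symm
      rw [hvv]
      by_cases hv : p.all pvValidPC = true
      · rw [if_pos hv, hv]
        simp
      · rw [if_neg hv]
        rw [Bool.not_eq_true] at hv
        rw [hv]
        simp
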